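-- pv_equiv track=rewrite | github.com/hjalmarendre/Transaction-check | transaktioner.py | check_total
-- ===== SOURCE A (Python) =====
-- def check_total(accounting,real):
--     """ Takes two dictionaries and checks if the two matches. """
--     check_date = []
--     check_sum = []
--     wrong_date = []
--     for key,value in real.items():
--         if key not in accounting:
--             check_date.append(key)
--         else:
--             sum_real = 0
--             for transaction in value:
--                 sum_real += transaction[0]
--             lst_accounting = accounting[key]
--             sum_accounting = 0
--             for transaction in lst_accounting:
--                 sum_accounting += transaction[0]
--             if not sum_real == sum_accounting:
--                 check_sum.append(key)
--     for key,value in accounting.items():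
--         if key not in real:
--             wrong_date.append(key)
--     return check_date,check_sum,wrong_date
-- ===== SOURCE B (Python) =====
-- def check_total(accounting, real):
--     """ Takes two dictionaries and checks if the two matches. """
--     # Merge both dicts into one table: key -> [real_value_or_None, accounting_value_or_None],
--     # then classify every key of the merged table in a single pass.
--     table = {}
--     for key, value in real.items():
--         table[key] = [value, None]
--     for key, value in accounting.items():
--         if key in table:
--             table[key][1] = value
--         else:
--             table[key] = [None, value]
--     check_date = []
--     check_sum = []
--     wrong_date = []
--     for key, (rv, av) in table.items():
--         if av is None:
--             check_date.append(key)
--         elif rv is None: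
--             wrong_date.append(key)
--         elif sum(t[0] for t in rv) != sum(t[0] for t in av):
--             check_sum.append(key)
--     return check_date, check_sum, wrong_date
-- ===== Notes on version B (the rewrite author's own statement) =====
-- stated objective: alternative
-- what changed: A makes two passes, each probing the other dict with membership tests and an inline lookup; B first merges both dicts into one union table mapping each key to its (real-side, accounting-side) value pair, then classifies every key of the merged table in a single lookup-free pass into missing/mismatch/extra.
import Mathlib
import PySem

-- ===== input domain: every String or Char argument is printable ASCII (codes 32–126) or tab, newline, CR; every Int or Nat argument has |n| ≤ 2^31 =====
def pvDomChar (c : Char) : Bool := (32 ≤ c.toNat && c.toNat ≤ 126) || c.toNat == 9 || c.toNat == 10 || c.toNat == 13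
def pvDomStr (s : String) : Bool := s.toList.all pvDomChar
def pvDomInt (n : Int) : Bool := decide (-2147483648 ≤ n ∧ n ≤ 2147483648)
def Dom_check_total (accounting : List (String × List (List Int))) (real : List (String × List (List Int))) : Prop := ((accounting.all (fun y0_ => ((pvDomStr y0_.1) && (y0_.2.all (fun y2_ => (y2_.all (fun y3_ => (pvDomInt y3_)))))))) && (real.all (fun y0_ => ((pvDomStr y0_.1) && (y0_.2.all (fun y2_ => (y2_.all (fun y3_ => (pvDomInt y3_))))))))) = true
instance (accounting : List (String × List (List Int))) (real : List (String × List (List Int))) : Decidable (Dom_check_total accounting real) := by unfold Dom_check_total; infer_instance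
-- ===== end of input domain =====

-- B replaces A's two cross-probing passes by a merge-then-classify algorithm: both dicts are
-- merged into one union table (key -> real-side/accounting-side value pair), then every key of
-- the table is classified in one lookup-free pass (objective: alternative decomposition, same cost).

-- shared dict primitives on association lists (Python dict: lookup/membership = first match)
def dictGet? {β : Type} (d : List (String × β)) (k : String) : Option β :=
  (d.find? (fun kv => kv.1 == k)).map (·.2)

def dictHas {β : Type} (d : List (String × β)) (k : String) : Bool :=
  d.any (fun kv => kv.1 == k)

-- ===== PORT A =====
def check_total (accounting : List (String × List (List Int))) (real : List (String × List (List Int))) : List String × List String × List String :=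
  -- first loop over real.items(): builds (check_date, check_sum); transaction[0] is pyGetD
  -- with default 0, exact under Pre_ (no empty transaction on a common key)
  let st := real.foldl (fun (st : List String × List String) kv =>
    match dictGet? accounting kv.1 with
    | none => (st.1 ++ [kv.1], st.2)                -- key not in accounting
    | some lst_accounting =>
        let sum_real := kv.2.foldl (fun s t => s + PySem.List.pyGetD t 0 0) 0
        let sum_accounting := lst_accounting.foldl (fun s t => s + PySem.List.pyGetD t 0 0) 0
        if sum_real = sum_accounting then st else (st.1, st.2 ++ [kv.1])) ([], [])
  -- second loop over accounting.items(): builds wrong_date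
  let wrong_date := accounting.foldl (fun (w : List String) kv =>
    if dictHas real kv.1 then w else w ++ [kv.1]) []
  (st.1, st.2, wrong_date)

-- ===== PORT B =====
-- sum(t[0] for t in v); t[0] is pyGetD with default 0, exact under Pre_
def rowSum (v : List (List Int)) : Int := (v.map (fun t => PySem.List.pyGetD t 0 0)).sum

-- Python `table[key][1] = value` / `table[key] = [None, value]` on the insertion-ordered dict
def updTable (table : List (String × (Option (List (List Int)) × Option (List (List Int)))))
    (k : String) (v : List (List Int)) :
    List (String × (Option (List (List Int)) × Option (List (List Int)))) :=
  if dictHas table k then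
    table.map (fun kv => if kv.1 == k then (kv.1, (kv.2.1, some v)) else kv)
  else table ++ [(k, (none, some v))]

def check_total_alt (accounting : List (String × List (List Int))) (real : List (String × List (List Int))) : List String × List String × List String :=
  let table0 := real.map (fun kv => (kv.1, (some kv.2, (none : Option (List (List Int))))))
  let table := accounting.foldl (fun t kv => updTable t kv.1 kv.2) table0
  table.foldl (fun (st : List String × List String × List String) kv =>
    match kv.2.2 with
    | none => (st.1 ++ [kv.1], st.2.1, st.2.2)          -- av is None: only in real
    | some av =>
      match kv.2.1 with
      | none => (st.1, st.2.1, st.2.2 ++ [kv.1])        -- rv is None: only in accounting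
      | some rv => if rowSum rv ≠ rowSum av then (st.1, st.2.1 ++ [kv.1], st.2.2) else st)
    ([], [], [])

-- ===== PRECONDITION & SPEC =====
-- Pre_ excludes (a) association lists with duplicate keys — a Python dict cannot hold them, so
-- the association-list representation is only faithful when keys are distinct — and (b) inputs
-- where some key common to both dicts has an empty transaction tuple, on which Python A (and B)
-- raise IndexError via transaction[0].
def Pre_check_total (accounting : List (String × List (List Int))) (real : List (String × List (List Int))) : Prop :=
  (accounting.map Prod.fst).Nodup ∧ (real.map Prod.fst).Nodup ∧
  ∀ kv ∈ real, dictHas accounting kv.1 = true →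
    ((∀ t ∈ kv.2, t ≠ []) ∧ ∀ kv' ∈ accounting, kv'.1 = kv.1 → ∀ t ∈ kv'.2, t ≠ [])
instance (accounting : List (String × List (List Int))) (real : List (String × List (List Int))) : Decidable (Pre_check_total accounting real) := by unfold Pre_check_total; infer_instance

def pvWitness_check_total : (List (String × List (List Int))) × (List (String × List (List Int))) :=
  ([("a", [[2, 1], [3]]), ("c", [[7]])], [("a", [[4]]), ("b", [])])

def Spec_check_total (accounting : List (String × List (List Int))) (real : List (String × List (List Int))) (out : List String × List String × List String) : Prop := out = check_total_alt accounting real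
instance (accounting : List (String × List (List Int))) (real : List (String × List (List Int))) (out : List String × List String × List String) : Decidable (Spec_check_total accounting real out) := by unfold Spec_check_total; infer_instance

-- ===== CLAIM (what is proved, stated in full; the proofs are below) =====
def Claim_equal_check_total : Prop := ∀ (accounting : List (String × List (List Int))) (real : List (String × List (List Int))), Dom_check_total accounting real → Pre_check_total accounting real → Spec_check_total accounting real (check_total accounting real)

-- ===== LEMMAS AND PROOFS =====

theorem dictHas_eq_isSome {β : Type} (d : List (String × β)) (k : String) :
    dictHas d k = (dictGet? d k).isSome := by
  simp [dictHas, dictGet?, List.isSome_find?]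

-- A's mismatch test, as a predicate on an entry of real
def aMismatch (accounting : List (String × List (List Int))) (kv : String × List (List Int)) : Bool :=
  match dictGet? accounting kv.1 with
  | none => false
  | some lst => !(rowSum kv.2 == rowSum lst)

theorem sum_foldl (v : List (List Int)) (c : Int) :
    v.foldl (fun s t => s + PySem.List.pyGetD t 0 0) c = c + rowSum v := by
  induction v generalizing c with
  | nil => simp [rowSum]
  | cons a t ih => simp [rowSum, ih, List.sum_cons]; ring

-- A's first loop, characterised as two filters over real
theorem loopA (accounting real : List (String × List (List Int)))
    (st : List String × List String) :
    real.foldl (fun (st : List String × List String) kv =>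
      match dictGet? accounting kv.1 with
      | none => (st.1 ++ [kv.1], st.2)
      | some lst_accounting =>
          let sum_real := kv.2.foldl (fun s t => s + PySem.List.pyGetD t 0 0) 0
          let sum_accounting := lst_accounting.foldl (fun s t => s + PySem.List.pyGetD t 0 0) 0
          if sum_real = sum_accounting then st else (st.1, st.2 ++ [kv.1])) st
    = (st.1 ++ (real.filter (fun kv => !dictHas accounting kv.1)).map (·.1),
       st.2 ++ (real.filter (aMismatch accounting)).map (·.1)) := by
  induction real generalizing st with
  | nil => simp
  | cons kv t ih =>
    rw [List.foldl_cons, ih]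
    cases h : dictGet? accounting kv.1 with
    | none =>
      have hh : dictHas accounting kv.1 = false := by simp [dictHas_eq_isSome, h]
      simp [h, hh, aMismatch]
    | some lst =>
      have hh : dictHas accounting kv.1 = true := by simp [dictHas_eq_isSome, h]
      by_cases he : rowSum kv.2 = rowSum lst
      · have hm : aMismatch accounting kv = false := by simp [aMismatch, h, he]
        simp [sum_foldl, he, hh, hm]
      · have hm : aMismatch accounting kv = true := by simp [aMismatch, h, he]
        simp [sum_foldl, he, hh, hm]

-- A's second loop, characterised as a filter over accounting
theorem loopWrong (accounting real : List (String × List (List Int))) (w : List String) :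
    accounting.foldl (fun (w : List String) kv =>
      if dictHas real kv.1 then w else w ++ [kv.1]) w
    = w ++ (accounting.filter (fun kv => !dictHas real kv.1)).map (·.1) := by
  induction accounting generalizing w with
  | nil => simp
  | cons kv t ih =>
    rw [List.foldl_cons, ih]
    by_cases hh : dictHas real kv.1 = true
    · simp [hh]
    · simp at hh
      simp [hh]

-- dictGet? over an appended singleton
theorem dictGet?_append_single {β : Type} (p : List (String × β)) (a : String × β) (k : String) :
    dictGet? (p ++ [a]) k = ((dictGet? p k).orElse (fun _ => if a.1 == k then some a.2 else none)) := by
  simp only [dictGet?, List.find?_append]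
  cases p.find? (fun kv => kv.1 == k) with
  | none =>
    by_cases h : a.1 = k
    · simp [List.find?, h, Option.orElse]
    · have hb : (a.1 == k) = false := by simp [h]
      simp [List.find?, hb, Option.orElse]
  | some x => simp [Option.orElse]

-- B's table after processing a nodup-keyed accounting list, characterised
theorem tableChar (real : List (String × List (List Int))) (acc : List (String × List (List Int)))
    (hnd : (acc.map Prod.fst).Nodup) :
    acc.foldl (fun t kv => updTable t kv.1 kv.2)
      (real.map (fun kv => (kv.1, (some kv.2, (none : Option (List (List Int)))))))
    = real.map (fun kv => (kv.1, (some kv.2, dictGet? acc kv.1)))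
      ++ (acc.filter (fun kv => !dictHas real kv.1)).map (fun kv => (kv.1, ((none : Option (List (List Int))), some kv.2))) := by
  induction acc using List.reverseRecOn with
  | nil => simp [dictGet?]
  | append_singleton p a ih =>
    rw [List.map_append, List.nodup_append] at hnd
    obtain ⟨hndp, -, hdisj⟩ := hnd
    have hna : a.1 ∉ p.map Prod.fst := fun hm => hdisj a.1 hm a.1 (by simp) rfl
    rw [List.foldl_append, ih hndp, List.foldl_cons, List.foldl_nil]
    have hGetP : dictGet? p a.1 = none := by
      simp only [dictGet?, Option.map_eq_none_iff, List.find?_eq_none]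
      intro x hx hk
      exact hna (List.mem_map.2 ⟨x, hx, by simpa using hk⟩)
    by_cases hr : dictHas real a.1 = true
    · -- a.1 present in real: update in place
      have hHas : dictHas (real.map (fun kv => (kv.1, (some kv.2, dictGet? p kv.1)))
          ++ (p.filter (fun kv => !dictHas real kv.1)).map (fun kv => (kv.1, ((none : Option (List (List Int))), some kv.2)))) a.1 = true := by
        simp only [dictHas, List.any_append, List.any_map, Bool.or_eq_true, List.any_eq_true] at hr ⊢
        obtain ⟨x, hx, hk⟩ := hr
        exact Or.inl ⟨x, hx, hk⟩
      rw [updTable, hHas, if_pos rfl, List.map_append, List.map_map, List.map_map]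
      congr 1
      · apply List.map_congr_left
        intro kv hkv
        by_cases hk : kv.1 = a.1
        · have : dictGet? (p ++ [a]) kv.1 = some a.2 := by
            rw [dictGet?_append_single, hk, hGetP]; simp
          rw [hk] at this
          simp [Function.comp, hk, this]
        · have : dictGet? (p ++ [a]) kv.1 = dictGet? p kv.1 := by
            rw [dictGet?_append_single]
            have hba : (a.1 == kv.1) = false := by
              rw [beq_eq_false_iff_ne]; exact fun he => hk he.symm
            rw [hba]
            cases dictGet? p kv.1 <;> simp [Option.orElse]
          simp only [Function.comp]
          rw [show (kv.1 == a.1) = false from by simp [hk]]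
          simp [this]
      · rw [List.filter_append]
        have : List.filter (fun kv => !dictHas real kv.1) [a] = [] := by
          simp [List.filter, hr]
        rw [this, List.append_nil]
        apply List.map_congr_left
        intro kv hkv
        have hkvr : dictHas real kv.1 = false := by
          have := List.of_mem_filter hkv
          simpa using this
        have hk : (kv.1 == a.1) = false := by
          by_contra h
          have : kv.1 = a.1 := by
            revert h; cases hb : (kv.1 == a.1) <;> simp_all
          rw [this] at hkvr; rw [hkvr] at hr; exact Bool.false_ne_true hr
        simp [Function.comp, hk]
    · -- a.1 absent from real: append new entry
      have hr' : dictHas real a.1 = false := by revert hr; cases dictHas real a.1 <;> simp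
      have hHas : dictHas (real.map (fun kv => (kv.1, (some kv.2, dictGet? p kv.1)))
          ++ (p.filter (fun kv => !dictHas real kv.1)).map (fun kv => (kv.1, ((none : Option (List (List Int))), some kv.2)))) a.1 = false := by
        simp only [dictHas, List.any_append, List.any_map, Bool.or_eq_false_iff, List.any_eq_false]
        constructor
        · intro x hx
          simp only [Function.comp]
          intro hk
          have : dictHas real a.1 = true := by
            simp only [dictHas, List.any_eq_true]
            exact ⟨x, hx, by simp [hk]⟩
          rw [hr'] at this; exact Bool.false_ne_true this
        · intro x hx
          simp only [Function.comp]
          intro hk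
          exact hna (List.mem_map.2 ⟨x, List.mem_of_mem_filter hx, by simpa using hk⟩)
      rw [updTable, hHas]
      simp only [Bool.false_eq_true, if_false]
      rw [List.append_assoc]
      congr 1
      · apply List.map_congr_left
        intro kv hkv
        have hk : (a.1 == kv.1) = false := by
          rw [beq_eq_false_iff_ne]
          intro hke
          have : dictHas real a.1 = true := by
            simp only [dictHas, List.any_eq_true]
            exact ⟨kv, hkv, by simp [hke]⟩
          rw [hr'] at this; exact Bool.false_ne_true this
        have : dictGet? (p ++ [a]) kv.1 = dictGet? p kv.1 := by
          rw [dictGet?_append_single, hk]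
          cases dictGet? p kv.1 <;> simp [Option.orElse]
        simp [this]
      · rw [List.filter_append]
        have : List.filter (fun kv => !dictHas real kv.1) [a] = [a] := by
          simp [List.filter, hr']
        rw [this, List.map_append]
        rfl

-- classification pass over the real-side part of the table
theorem classFirst (acc real : List (String × List (List Int)))
    (st : List String × List String × List String) :
    (real.map (fun kv => (kv.1, (some kv.2, dictGet? acc kv.1)))).foldl
      (fun (st : List String × List String × List String) kv =>
        match kv.2.2 with
        | none => (st.1 ++ [kv.1], st.2.1, st.2.2)
        | some av =>
          match kv.2.1 with
          | none => (st.1, st.2.1, st.2.2 ++ [kv.1])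
          | some rv => if rowSum rv ≠ rowSum av then (st.1, st.2.1 ++ [kv.1], st.2.2) else st) st
    = (st.1 ++ (real.filter (fun kv => !dictHas acc kv.1)).map (·.1),
       st.2.1 ++ (real.filter (aMismatch acc)).map (·.1), st.2.2) := by
  induction real generalizing st with
  | nil => simp
  | cons kv t ih =>
    rw [List.map_cons, List.foldl_cons, ih]
    cases h : dictGet? acc kv.1 with
    | none =>
      have hh : dictHas acc kv.1 = false := by simp [dictHas_eq_isSome, h]
      simp [hh, aMismatch, h]
    | some lst =>
      have hh : dictHas acc kv.1 = true := by simp [dictHas_eq_isSome, h]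
      by_cases he : rowSum kv.2 = rowSum lst
      · have hm : aMismatch acc kv = false := by simp [aMismatch, h, he]
        simp [hh, hm, he]
      · have hm : aMismatch acc kv = true := by simp [aMismatch, h, he]
        simp [hh, hm, he]

-- classification pass over the accounting-only part of the table
theorem classSecond (l : List (String × List (List Int)))
    (st : List String × List String × List String) :
    (l.map (fun kv => (kv.1, ((none : Option (List (List Int))), some kv.2)))).foldl
      (fun (st : List String × List String × List String) kv =>
        match kv.2.2 with
        | none => (st.1 ++ [kv.1], st.2.1, st.2.2)
        | some av =>
          match kv.2.1 with
          | none => (st.1, st.2.1, st.2.2 ++ [kv.1])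
          | some rv => if rowSum rv ≠ rowSum av then (st.1, st.2.1 ++ [kv.1], st.2.2) else st) st
    = (st.1, st.2.1, st.2.2 ++ l.map (·.1)) := by
  induction l generalizing st with
  | nil => simp
  | cons kv t ih =>
    rw [List.map_cons, List.foldl_cons, ih]
    simp

theorem check_total_eq_alt (accounting real : List (String × List (List Int)))
    (hndA : (accounting.map Prod.fst).Nodup) :
    check_total accounting real = check_total_alt accounting real := by
  simp only [check_total, check_total_alt]
  rw [loopA, loopWrong, tableChar real accounting hndA, List.foldl_append,
      classFirst, classSecond]

-- ===== VERDICT (by name: the statement is the Claim_ definition above) =====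
theorem check_total_spec : Claim_equal_check_total := by
  intro accounting real _ hpre
  exact check_total_eq_alt accounting real hpre.1
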